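-- pv_equiv track=rewrite | github.com/CaseScope/caseScope_2026 | utils/deterministic_evidence_engine.py | _group_anchors_by_key
-- ===== SOURCE A (Python) =====
-- from typing import Dict, List, Optional, Tuple, Any
--
-- def _group_anchors_by_key(
--     anchors: List[Dict], correlation_fields: List[str]
-- ) -> Dict[str, List[Dict]]:
--     groups: Dict[str, List[Dict]] = {}
--     for anchor in anchors:
--         parts = [str(anchor.get(f, '')) for f in correlation_fields]
--         key = '|'.join(parts)
--         groups.setdefault(key, []).append(anchor)
--     return groups
-- ===== SOURCE B (Python) =====
-- def _group_anchors_by_key(anchors, correlation_fields):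
--     keyed = [('|'.join(str(a.get(f, '')) for f in correlation_fields), a) for a in anchors]
--     keys = list(dict.fromkeys(k for k, _ in keyed))
--     return {k: [a for kk, a in keyed if kk == k] for k in keys}
-- ===== Notes on version B (the rewrite author's own statement) =====
-- stated objective: alternative
-- what changed: Replaces the single-pass setdefault-append loop by a key-tagging pass, an ordered key dedup (dict.fromkeys), and one per-key comprehension that collects each group by scanning the tagged list.
import Mathlib
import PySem

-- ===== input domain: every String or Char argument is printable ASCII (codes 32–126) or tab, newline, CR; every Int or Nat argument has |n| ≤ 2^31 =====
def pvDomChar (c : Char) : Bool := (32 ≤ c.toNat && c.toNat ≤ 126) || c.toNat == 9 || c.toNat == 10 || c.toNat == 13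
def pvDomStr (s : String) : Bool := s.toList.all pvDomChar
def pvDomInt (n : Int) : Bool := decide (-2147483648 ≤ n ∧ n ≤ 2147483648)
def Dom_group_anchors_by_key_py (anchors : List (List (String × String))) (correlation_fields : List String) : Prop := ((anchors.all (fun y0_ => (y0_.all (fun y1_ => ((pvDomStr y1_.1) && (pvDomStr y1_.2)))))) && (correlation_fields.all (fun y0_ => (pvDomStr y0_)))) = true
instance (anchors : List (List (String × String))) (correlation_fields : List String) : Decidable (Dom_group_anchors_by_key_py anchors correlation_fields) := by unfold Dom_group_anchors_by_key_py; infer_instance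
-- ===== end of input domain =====

-- B replaces A's single-pass setdefault/append loop by tagging each anchor with its key,
-- deduplicating the keys in first-occurrence order, and collecting each group with one
-- per-key scan of the tagged list (objective: alternative decomposition, same results).


-- ===== PORT A =====
-- key = '|'.join(str(anchor.get(f, '')) for f in correlation_fields)
-- (anchor is a dict of strings, so str() is the identity; .get is first-match lookup, exact via Dict.mk)
def pvMkKey (correlation_fields : List String) (anchor : List (String × String)) : String :=
  PySem.Str.join "|" (correlation_fields.map (fun f => (PySem.Dict.mk anchor).getD f ""))

-- groups.setdefault(key, []).append(anchor) is exactly groups.modify key [] (· ++ [anchor])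
def group_anchors_by_key_py (anchors : List (List (String × String))) (correlation_fields : List String) : List (String × List (List (String × String))) :=
  (anchors.foldl
    (fun groups anchor => groups.modify (pvMkKey correlation_fields anchor) [] (· ++ [anchor]))
    (PySem.Dict.empty : PySem.Dict String (List (List (String × String))))).items

-- ===== PORT B =====
def group_anchors_by_key_py_alt (anchors : List (List (String × String))) (correlation_fields : List String) : List (String × List (List (String × String))) :=
  let keyed := anchors.map (fun a => (pvMkKey correlation_fields a, a))
  let keys := PySem.List.dedup (keyed.map (·.1))
  keys.map (fun k => (k, (keyed.filter (fun p => p.1 == k)).map (·.2)))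

-- ===== PRECONDITION & SPEC =====
def Spec_group_anchors_by_key_py (anchors : List (List (String × String))) (correlation_fields : List String) (out : List (String × List (List (String × String)))) : Prop := out = group_anchors_by_key_py_alt anchors correlation_fields
instance (anchors : List (List (String × String))) (correlation_fields : List String) (out : List (String × List (List (String × String)))) : Decidable (Spec_group_anchors_by_key_py anchors correlation_fields out) := by unfold Spec_group_anchors_by_key_py; infer_instance

-- ===== CLAIM (what is proved, stated in full; the proofs are below) =====
def Claim_equal_group_anchors_by_key_py : Prop := ∀ (anchors : List (List (String × String))) (correlation_fields : List String), Dom_group_anchors_by_key_py anchors correlation_fields → Spec_group_anchors_by_key_py anchors correlation_fields (group_anchors_by_key_py anchors correlation_fields)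

-- ===== LEMMAS AND PROOFS =====

theorem group_anchors_main (anchors : List (List (String × String))) (correlation_fields : List String) :
    group_anchors_by_key_py anchors correlation_fields
      = group_anchors_by_key_py_alt anchors correlation_fields := by
  unfold group_anchors_by_key_py group_anchors_by_key_py_alt
  set key := pvMkKey correlation_fields with hk
  set keyed := anchors.map (fun a => (key a, a)) with hkeyed
  -- rewrite A's fold over anchors as a fold over the tagged pairs
  have hfold :
      anchors.foldl
        (fun groups anchor => groups.modify (key anchor) [] (· ++ [anchor]))
        (PySem.Dict.empty : PySem.Dict String (List (List (String × String))))
      = keyed.foldl (fun d p => d.modify p.1 [] (· ++ [p.2])) PySem.Dict.empty := by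
    rw [hkeyed, List.foldl_map]
  rw [hfold]
  set D := keyed.foldl (fun d p => d.modify p.1 [] (· ++ [p.2]))
      (PySem.Dict.empty : PySem.Dict String (List (List (String × String)))) with hD
  have hnodup : D.keys.Nodup := by
    rw [hD]
    exact PySem.Dict.nodup_keys_foldl_modify_key keyed (·.1) [] (fun d p => (· ++ [p.2]))
      PySem.Dict.empty (by simp [PySem.Dict.empty, PySem.Dict.keys])
  have hkeys : D.keys = PySem.List.dedup (keyed.map (·.1)) := by
    rw [hD, PySem.Dict.keys_foldl_modify_key]
    simp [PySem.Dict.empty, PySem.Dict.keys, PySem.Set.update_nil_left]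
  have hgetD : ∀ k, D.getD k [] = (keyed.filter (fun p => p.1 == k)).map (·.2) := by
    intro k
    rw [hD, PySem.Dict.getD_foldl_modify_append]
    simp [PySem.Dict.empty, PySem.Dict.getD, PySem.Dict.get?]
  rw [PySem.Dict.items_eq_map_keys D hnodup [], hkeys]
  exact List.map_congr_left (fun k _ => by rw [hgetD k])

-- ===== VERDICT (by name: the statement is the Claim_ definition above) =====
theorem group_anchors_by_key_py_spec : Claim_equal_group_anchors_by_key_py := by
  intro anchors correlation_fields _
  unfold Spec_group_anchors_by_key_py
  exact group_anchors_main anchors correlation_fields
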